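-- pv_equiv track=rewrite | github.com/galaxybomb23/LAFVT | AutoUP/tests/find_root_functions_2.py | remove_strings
-- ===== SOURCE A (Python) =====
-- def remove_strings(code: str) -> str:
--     """Remove string contents while preserving structure."""
--     result = []
--     i = 0
--
--     while i < len(code):
--         if code[i] == '"':
--             result.append('"')
--             i += 1
--             # Skip until end of string
--             while i < len(code):
--                 if code[i] == '\\' and i + 1 < len(code):
--                     i += 2
--                     continue
--                 if code[i] == '"':
--                     result.append('"')
--                     i += 1
--                     break
--                 if code[i] == '\n':
--                     result.append('\n')
--                 i += 1
--         elif code[i] == "'":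
--             result.append("'")
--             i += 1
--             while i < len(code) and code[i] != "'":
--                 if code[i] == '\\' and i + 1 < len(code):
--                     i += 2
--                     continue
--                 i += 1
--             if i < len(code):
--                 result.append("'")
--                 i += 1
--         else:
--             result.append(code[i])
--             i += 1
--
--     return ''.join(result)
-- ===== SOURCE B (Python) =====
-- def remove_strings(code: str) -> str:
--     """Remove string contents while preserving structure (flat state machine)."""
--     NONE, DOUBLE, SINGLE = 0, 1, 2
--     state = NONE
--     out = []
--     i, n = 0, len(code)
--     while i < n:
--         c = code[i]
--         if state == NONE:
--             out.append(c)
--             if c == '"':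
--                 state = DOUBLE
--             elif c == "'":
--                 state = SINGLE
--             i += 1
--         elif c == '\\' and i + 1 < n:
--             i += 2
--         else:
--             if state == DOUBLE:
--                 if c == '"':
--                     out.append(c)
--                     state = NONE
--                 elif c == '\n':
--                     out.append(c)
--             else:
--                 if c == "'":
--                     out.append(c)
--                     state = NONE
--             i += 1
--     return ''.join(out)
-- ===== Notes on version B (the rewrite author's own statement) =====
-- stated objective: alternative
-- what changed: A's outer loop with two nested inner while-loops (one per quote kind) is replaced by a single flat one-pass state machine with an explicit OUTSIDE/DOUBLE/SINGLE state variable.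
import Mathlib
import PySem

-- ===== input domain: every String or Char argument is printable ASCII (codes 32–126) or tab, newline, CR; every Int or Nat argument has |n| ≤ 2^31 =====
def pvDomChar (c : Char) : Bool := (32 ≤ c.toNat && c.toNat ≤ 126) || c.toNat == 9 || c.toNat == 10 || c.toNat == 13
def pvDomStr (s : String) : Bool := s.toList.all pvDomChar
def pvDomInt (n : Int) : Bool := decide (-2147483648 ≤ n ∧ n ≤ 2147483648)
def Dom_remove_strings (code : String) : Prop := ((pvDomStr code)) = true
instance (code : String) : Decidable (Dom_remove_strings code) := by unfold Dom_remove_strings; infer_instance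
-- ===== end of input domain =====

-- B replaces A's outer loop with two nested inner while-loops by a single flat one-pass state machine (objective: alternative decomposition, same cost).

-- ===== PORT A =====
-- A's inner double-quote loop: returns (chars the loop appends, remaining input after the loop);
-- branch order as in A: escape-with-lookahead, closing quote, newline, skip
def pyInDouble : List Char → List Char × List Char
  | [] => ([], [])
  | '\\' :: _ :: rest => pyInDouble rest
  | '"' :: rest => (['"'], rest)
  | '\n' :: rest => ('\n' :: (pyInDouble rest).1, (pyInDouble rest).2)
  | _ :: rest => pyInDouble rest

-- A's inner single-quote loop (closing quote ends it; escape-with-lookahead; else skip),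
-- including the conditional closing-quote append after the loop
def pyInSingle : List Char → List Char × List Char
  | [] => ([], [])
  | '\'' :: rest => (['\''], rest)
  | '\\' :: _ :: rest => pyInSingle rest
  | _ :: rest => pyInSingle rest

-- needed by pyOuter's termination proof
theorem pyInDouble_len (cs : List Char) : (pyInDouble cs).2.length ≤ cs.length := by
  fun_induction pyInDouble cs <;> simp_all <;> omega

theorem pyInSingle_len (cs : List Char) : (pyInSingle cs).2.length ≤ cs.length := by
  fun_induction pyInSingle cs <;> simp_all <;> omega

-- A's outer while-loop
def pyOuter : List Char → List Char
  | [] => []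
  | c :: rest =>
      if c = '"' then
        '"' :: ((pyInDouble rest).1 ++ pyOuter (pyInDouble rest).2)
      else if c = '\'' then
        '\'' :: ((pyInSingle rest).1 ++ pyOuter (pyInSingle rest).2)
      else c :: pyOuter rest
termination_by cs => cs.length
decreasing_by
  · have := pyInDouble_len rest; simp only [List.length_cons]; omega
  · have := pyInSingle_len rest; simp only [List.length_cons]; omega
  · simp

def remove_strings (code : String) : String := String.ofList (pyOuter code.toList)

-- ===== PORT B =====
inductive PvSt | out | dq | sq

-- B's single flat loop: one step per position; the state says whether we are inside a string
def altGo : PvSt → List Char → List Char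
  | _, [] => []
  | .out, c :: rest =>
      c :: altGo (if c = '"' then .dq else if c = '\'' then .sq else .out) rest
  | .dq, '\\' :: _ :: rest => altGo .dq rest
  | .dq, '"' :: rest => '"' :: altGo .out rest
  | .dq, '\n' :: rest => '\n' :: altGo .dq rest
  | .dq, _ :: rest => altGo .dq rest
  | .sq, '\\' :: _ :: rest => altGo .sq rest
  | .sq, '\'' :: rest => '\'' :: altGo .out rest
  | .sq, _ :: rest => altGo .sq rest

def remove_strings_alt (code : String) : String := String.ofList (altGo .out code.toList)

-- ===== PRECONDITION & SPEC =====
def Spec_remove_strings (code : String) (out : String) : Prop := out = remove_strings_alt code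
instance (code : String) (out : String) : Decidable (Spec_remove_strings code out) := by unfold Spec_remove_strings; infer_instance

-- ===== CLAIM (what is proved, stated in full; the proofs are below) =====
def Claim_equal_remove_strings : Prop := ∀ (code : String), Dom_remove_strings code → Spec_remove_strings code (remove_strings code)

-- ===== LEMMAS AND PROOFS =====
theorem altGo_dq (cs : List Char) :
    altGo .dq cs = (pyInDouble cs).1 ++ altGo .out (pyInDouble cs).2 := by
  fun_induction pyInDouble cs <;> simp_all [altGo]

theorem altGo_sq (cs : List Char) :
    altGo .sq cs = (pyInSingle cs).1 ++ altGo .out (pyInSingle cs).2 := by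
  fun_induction pyInSingle cs <;> simp_all [altGo]

theorem outer_eq (cs : List Char) : pyOuter cs = altGo .out cs := by
  fun_induction pyOuter cs with
  | case1 => simp [altGo]
  | case2 rest ih => rw [altGo]; simp [altGo_dq, ih]
  | case3 rest h ih => rw [altGo]; simp [altGo_sq, ih]
  | case4 c rest h1 h2 ih => rw [altGo]; simp [h1, h2, ih]

-- ===== VERDICT (by name: the statement is the Claim_ definition above) =====
theorem remove_strings_spec : Claim_equal_remove_strings := by
  intro code _
  unfold Spec_remove_strings remove_strings remove_strings_alt
  rw [outer_eq]
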